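-- pv_equiv track=rewrite | github.com/danneboii206/python-bth | kmom10/typing/checker.py | word_length_checker
-- ===== SOURCE A (Python) =====
-- def word_length_checker(word_list):
--     '''
--     Checking the length of a word_list
--     '''
--     counter = i = 0 #iterations with different uses
--     loop_am = len(word_list)
--     while i < loop_am:
--         list_of = word_list[i].split(" ")
--         for _ in list_of:
--             counter +=1
--         i += 1
--     return counter
-- ===== SOURCE B (Python) =====
-- def word_length_checker(word_list):
--     '''
--     Checking the length of a word_list
--     '''
--     if not word_list:
--         return 0
--     return len(" ".join(word_list).split(" "))
-- ===== Notes on version B (the rewrite author's own statement) =====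
-- stated objective: alternative
-- what changed: Instead of iterating over the list splitting each string and incrementing a counter once per piece, B does no per-string accounting: it joins the whole list into one string with ' ' and splits that single string once, returning the length of the one resulting list (correct because joining with the same separator makes the piece counts add up).
import Mathlib
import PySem

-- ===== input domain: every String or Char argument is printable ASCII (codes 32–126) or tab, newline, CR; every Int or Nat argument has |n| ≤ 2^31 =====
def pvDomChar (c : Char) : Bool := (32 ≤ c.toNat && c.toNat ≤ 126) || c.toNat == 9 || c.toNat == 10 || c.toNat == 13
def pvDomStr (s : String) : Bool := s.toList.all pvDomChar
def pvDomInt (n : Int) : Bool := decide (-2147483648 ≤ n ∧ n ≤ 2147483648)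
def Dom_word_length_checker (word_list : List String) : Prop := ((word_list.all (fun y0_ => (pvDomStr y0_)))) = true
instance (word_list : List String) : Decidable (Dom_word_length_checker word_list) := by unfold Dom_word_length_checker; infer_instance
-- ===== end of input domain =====

-- B does no per-string accounting: it joins the list into one string with " " and splits that once.

-- ===== PORT A =====
-- while i < len: split word_list[i] on " ", then 'for _ in list_of: counter += 1'
def word_length_checker (word_list : List String) : Int :=
  word_list.foldl
    (fun counter w =>
      ((PySem.Str.split? w " ").getD []).foldl (fun c _ => c + 1) counter)
    0

-- ===== PORT B =====
-- if not word_list: return 0; return len(" ".join(word_list).split(" "))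
def word_length_checker_alt (word_list : List String) : Int :=
  if word_list = [] then 0
  else ((PySem.Str.split? (PySem.Str.join " " word_list) " ").getD []).length

-- ===== PRECONDITION & SPEC =====
def Spec_word_length_checker (word_list : List String) (out : Int) : Prop := out = word_length_checker_alt word_list
instance (word_list : List String) (out : Int) : Decidable (Spec_word_length_checker word_list out) := by unfold Spec_word_length_checker; infer_instance

-- ===== CLAIM (what is proved, stated in full; the proofs are below) =====
def Claim_equal_word_length_checker : Prop := ∀ (word_list : List String), Dom_word_length_checker word_list → Spec_word_length_checker word_list (word_length_checker word_list)

-- ===== LEMMAS AND PROOFS =====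

-- splitOn.go with single-char separator produces (count c) + 1 + |acc| pieces
theorem splitOnGo_singleton (c : Char) : ∀ (l : List Char) (fuel : Nat) (cur : List Char)
    (acc : List (List Char)), l.length < fuel →
    (PySem.Chars.splitOn.go [c] fuel l cur acc).length = acc.length + 1 + l.count c := by
  intro l
  induction l with
  | nil =>
    intro fuel cur acc h
    cases fuel with
    | zero => omega
    | succ f => simp [PySem.Chars.splitOn.go]
  | cons x t ih =>
    intro fuel cur acc h
    cases fuel with
    | zero => omega
    | succ f =>
      simp only [List.length_cons, Nat.succ_lt_succ_iff] at h
      by_cases hx : c = x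
      · subst hx
        simp [PySem.Chars.splitOn.go, List.isPrefixOf,
          ih f [] (cur.reverse :: acc) h]
        omega
      · have hpre : ([c].isPrefixOf (x :: t)) = false := by
          simp [List.isPrefixOf]; exact hx
        simp [PySem.Chars.splitOn.go, hpre, ih f (x :: cur) acc h, List.count_cons,
          (by simp; exact fun h => hx h.symm : (x == c) = false)]

theorem splitOn_singleton_length (c : Char) (s : List Char) :
    (PySem.Chars.splitOn s [c]).length = s.count c + 1 := by
  unfold PySem.Chars.splitOn
  rw [splitOnGo_singleton c s (s.length + 1) [] [] (by omega)]
  simp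
  omega

-- len of a split on " " is count(' ') + 1 (over the char list)
theorem split_space_length (w : String) :
    ((PySem.Str.split? w " ").getD []).length = w.toList.count ' ' + 1 := by
  have hmap := PySem.Str.split?_map w " "
  have hsep : (" " : String).toList = [' '] := rfl
  rw [hsep] at hmap
  have hsplit : PySem.Chars.split? w.toList [' '] = some (PySem.Chars.splitOn w.toList [' ']) := by
    simp [PySem.Chars.split?]
  rw [hsplit] at hmap
  cases hv : PySem.Str.split? w " " with
  | none => rw [hv] at hmap; simp at hmap
  | some l =>
    rw [hv] at hmap
    simp only [Option.map_some, Option.some.injEq] at hmap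
    have hlen : l.length = (PySem.Chars.splitOn w.toList [' ']).length := by
      rw [← hmap]; simp
    rw [Option.getD_some, hlen, splitOn_singleton_length]

-- the inner 'for _ in list_of: counter += 1' adds the list's length
theorem foldl_add_one_len {α : Type} (l : List α) : ∀ (a : Int),
    l.foldl (fun c _ => c + 1) a = a + l.length := by
  induction l with
  | nil => intro a; simp
  | cons x t ih => intro a; simp [List.foldl, ih]; omega

-- A computes Σ (count ' ' + 1) over the strings
theorem wlc_A_eq (word_list : List String) :
    word_length_checker word_list
      = (word_list.map (fun w => (w.toList.count ' ' : Int) + 1)).sum := by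
  unfold word_length_checker
  induction word_list with
  | nil => simp
  | cons w t ih =>
    simp only [List.foldl_cons, List.map_cons, List.sum_cons]
    rw [foldl_add_one_len, split_space_length]
    have h0 : ∀ (a : Int) (l : List String),
        l.foldl (fun counter w => ((PySem.Str.split? w " ").getD []).foldl (fun c _ => c + 1) counter) a
        = a + l.foldl (fun counter w => ((PySem.Str.split? w " ").getD []).foldl (fun c _ => c + 1) counter) 0 := by
      intro a l
      induction l generalizing a with
      | nil => simp
      | cons y u ihu =>
        simp only [List.foldl_cons]
        rw [foldl_add_one_len, foldl_add_one_len, ihu, ihu (0 + _)]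
        omega
    rw [h0]
    unfold word_length_checker at ih
    rw [ih]
    push_cast
    ring

-- counting c over an intercalate by [c]: each of the (n-1) separators contributes one
theorem count_intercalate (c : Char) : ∀ (p : List Char) (ps : List (List Char)),
    (List.intercalate [c] (p :: ps)).count c
      = p.count c + ((ps.map (fun q => q.count c)).sum + ps.length) := by
  intro p ps
  induction ps generalizing p with
  | nil => simp [List.intercalate]
  | cons q rest ih =>
    have hstep : List.intercalate [c] (p :: q :: rest)
        = p ++ [c] ++ List.intercalate [c] (q :: rest) := by
      simp [List.intercalate, List.intersperse]
    rw [hstep]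
    simp only [List.count_append, ih q, List.map_cons, List.sum_cons, List.length_cons]
    simp
    omega

-- B on a nonempty list equals the same sum
theorem wlc_B_eq (w : String) (t : List String) :
    word_length_checker_alt (w :: t)
      = ((w :: t).map (fun u => (u.toList.count ' ' : Int) + 1)).sum := by
  unfold word_length_checker_alt
  simp only [reduceCtorEq, if_false]
  rw [split_space_length]
  have hj : (PySem.Str.join " " (w :: t)).toList
      = PySem.Chars.join (" ".toList) ((w :: t).map String.toList) :=
    PySem.Str.toList_join " " (w :: t)
  have hsep : (" " : String).toList = [' '] := rfl
  rw [hj, hsep]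
  unfold PySem.Chars.join
  simp only [List.map_cons]
  rw [count_intercalate]
  have hsum : ∀ (l : List String),
      (l.map (fun u => (u.toList.count ' ' : Int) + 1)).sum
        = (((l.map String.toList).map (fun q => q.count ' ')).sum : Int) + l.length := by
    intro l; induction l with
    | nil => simp
    | cons x u ihu => simp only [List.map_cons, List.sum_cons, ihu, List.length_cons]; push_cast; ring
  simp only [List.sum_cons, hsum t]
  push_cast
  simp only [List.length_map, List.map_map, Function.comp_def]
  ring

-- ===== VERDICT (by name: the statement is the Claim_ definition above) =====
theorem word_length_checker_spec : Claim_equal_word_length_checker := by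
  intro word_list _
  unfold Spec_word_length_checker
  cases word_list with
  | nil => rfl
  | cons w t => rw [wlc_A_eq, wlc_B_eq]
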